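-- pv_equiv track=rewrite | github.com/sunilgitb/DSAlgo-Python | 22_Math/18. Make Product Equal One.py | solve
-- ===== SOURCE A (Python) =====
-- def solve(n, arr):
--     moves = 0
--     negatives = 0
--     zeroes = 0
--
--     for i in range(n):
--         if arr[i] > 0:
--             # convert positive to 1
--             moves += arr[i] - 1
--         elif arr[i] < 0:
--             # convert negative to -1
--             moves += -1 - arr[i]
--             negatives += 1
--         else:
--             # count zeros
--             zeroes += 1
--
--     # if odd number of negatives, adjust
--     if negatives % 2 == 1:
--         if zeroes > 0:
--             # use a zero to balance negative count
--             moves += 1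
--             zeroes -= 1
--         else:
--             # flip one -1 to 1 using 2 moves
--             moves += 2
--             negatives -= 1
--
--     # convert remaining zeros to 1
--     moves += zeroes
--
--     return moves
-- ===== SOURCE B (Python) =====
-- def solve(n, arr):
--     # View it as an assignment problem: send each element to its nearest
--     # target in {1, -1} (negatives to -1, others to 1), then, if the chosen
--     # targets multiply to -1, repair parity by flipping the single element
--     # whose opposite target is cheapest (tracked as a running minimum).
--     xs = arr[:n] if n > 0 else []
--     base = 0
--     signneg = False
--     flip = None
--     for x in xs:
--         lo, hi = sorted((abs(x - 1), abs(x + 1)))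
--         base += lo
--         if x < 0:
--             signneg = not signneg
--         d = hi - lo
--         if flip is None or d < flip:
--             flip = d
--     return base + (flip if signneg else 0)
-- ===== Notes on version B (the rewrite author's own statement) =====
-- stated objective: alternative
-- what changed: Recasts the task as an assignment problem: each element pays its distance to the nearest target in {1,-1} and a running minimum tracks the cheapest parity repair (flip cost), replacing A's negative/zero counters and the stateful zero-borrowing branch.
import Mathlib
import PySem

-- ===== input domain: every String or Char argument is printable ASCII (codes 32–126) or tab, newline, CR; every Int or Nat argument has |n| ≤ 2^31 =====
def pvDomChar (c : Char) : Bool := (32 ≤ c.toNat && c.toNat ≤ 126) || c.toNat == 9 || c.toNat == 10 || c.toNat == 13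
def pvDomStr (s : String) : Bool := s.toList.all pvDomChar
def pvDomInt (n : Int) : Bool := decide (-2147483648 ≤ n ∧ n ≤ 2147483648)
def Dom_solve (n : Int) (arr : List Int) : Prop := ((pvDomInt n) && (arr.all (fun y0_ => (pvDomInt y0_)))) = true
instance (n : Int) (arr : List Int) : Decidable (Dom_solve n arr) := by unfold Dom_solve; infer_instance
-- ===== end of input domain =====

-- B recasts A's counter-and-branch loop as nearest-target assignment plus a running-minimum parity repair (objective: alternative).


-- ===== PORT A =====
-- loop state: (moves, negatives, zeroes)
def solveStep (s : Int × Int × Int) (x : Int) : Int × Int × Int :=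
  if x > 0 then (s.1 + (x - 1), s.2.1, s.2.2)
  else if x < 0 then (s.1 + (-1 - x), s.2.1 + 1, s.2.2)
  else (s.1, s.2.1, s.2.2 + 1)

def solve (n : Int) (arr : List Int) : Int :=
  let s := (PySem.List.pyRange 0 n 1).foldl
    (fun s i => solveStep s (PySem.List.pyGetD arr i 0)) (0, 0, 0)
  -- tail adjustment, exactly A's branches
  let s2 := if s.2.1 % 2 = 1 then
              (if s.2.2 > 0 then (s.1 + 1, s.2.1, s.2.2 - 1)
               else (s.1 + 2, s.2.1 - 1, s.2.2))
            else s
  s2.1 + s2.2.2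

-- ===== PORT B =====
-- loop state: (base cost, product-of-targets is negative, cheapest flip cost so far)
def bstep (s : Int × Bool × Option Int) (x : Int) : Int × Bool × Option Int :=
  let lo := min |x - 1| |x + 1|
  let hi := max |x - 1| |x + 1|
  let base := s.1 + lo
  let sg := if x < 0 then !s.2.1 else s.2.1
  let d := hi - lo
  let f := match s.2.2 with
    | none => some d
    | some v => if d < v then some d else some v
  (base, sg, f)

def solve_alt (n : Int) (arr : List Int) : Int :=
  let xs := if n > 0 then PySem.List.slice arr none (some n) else []
  let s := xs.foldl bstep (0, false, none)
  -- `.getD 0` is unreachable: a negative product sign implies the loop ran, so the flip minimum is set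
  s.1 + (if s.2.1 then s.2.2.getD 0 else 0)

-- ===== PRECONDITION & SPEC =====
-- Pre_ excludes exactly the inputs where A raises IndexError (n exceeds the list length).
def Pre_solve (n : Int) (arr : List Int) : Prop := n ≤ (arr.length : Int)
instance (n : Int) (arr : List Int) : Decidable (Pre_solve n arr) := by unfold Pre_solve; infer_instance
def pvWitness_solve : Int × List Int := (3, [2, -3, 0])

def Spec_solve (n : Int) (arr : List Int) (out : Int) : Prop := out = solve_alt n arr
instance (n : Int) (arr : List Int) (out : Int) : Decidable (Spec_solve n arr out) := by unfold Spec_solve; infer_instance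

-- ===== CLAIM (what is proved, stated in full; the proofs are below) =====
def Claim_equal_solve : Prop := ∀ (n : Int) (arr : List Int), Dom_solve n arr → Pre_solve n arr → Spec_solve n arr (solve n arr)

-- ===== LEMMAS AND PROOFS =====

def msum (ys : List Int) : Int := ((ys.filter (fun x => x ≠ 0)).map (fun x => |x| - 1)).sum
def zsum (ys : List Int) : Int := ((ys.filter (fun x => x = 0)).map (fun _ => (1 : Int))).sum
def gsum (ys : List Int) : Int := ((ys.filter (fun x => x < 0)).map (fun _ => (1 : Int))).sum

lemma trip (ys : List Int) : ∀ m g z : Int,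
    ys.foldl solveStep (m, g, z) = (m + msum ys, g + gsum ys, z + zsum ys) := by
  induction ys with
  | nil => intro m g z; simp [msum, zsum, gsum]
  | cons x ys ih =>
    intro m g z
    simp only [List.foldl_cons, ih]
    rcases lt_trichotomy x 0 with h | h | h
    · simp [solveStep, msum, gsum, zsum, h, not_lt.mpr h.le, ne_of_lt h, abs_of_neg h]
      omega
    · subst h; simp [solveStep, msum, gsum, zsum]; ring
    · simp [solveStep, msum, gsum, zsum, h, ne_of_gt h, not_lt.mpr h.le, abs_of_pos h]
      omega

lemma zsum_nonneg (ys : List Int) : 0 ≤ zsum ys := by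
  unfold zsum
  rw [PySem.List.sum_map_const_int]
  positivity

lemma gsum_nonneg (ys : List Int) : 0 ≤ gsum ys := by
  unfold gsum
  rw [PySem.List.sum_map_const_int]
  positivity

lemma gsum_nil_of_nil (ys : List Int) (h : ys = []) : gsum ys = 0 := by
  subst h; simp [gsum]

-- option minimum, keeping a value over none
def omin : Option Int → Option Int → Option Int
  | none, o => o
  | some v, none => some v
  | some v, some w => some (min v w)

-- closed form of B's flip minimum
def flipv (ys : List Int) : Option Int :=
  if ys = [] then none else some (if zsum ys = 0 then 2 else 0)

lemma omin_assoc (a b c : Option Int) : omin (omin a b) c = omin a (omin b c) := by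
  cases a <;> cases b <;> cases c <;> simp [omin, min_assoc]

lemma flipv_cons (x : Int) (ys : List Int) :
    flipv (x :: ys) = omin (some (if x = 0 then 0 else 2)) (flipv ys) := by
  have hz := zsum_nonneg ys
  by_cases hys : ys = []
  · subst hys
    by_cases hx : x = 0 <;> simp [flipv, zsum, omin, hx]
  · by_cases hx : x = 0
    · subst hx
      have h1 : zsum ((0 : Int) :: ys) = 1 + zsum ys := by simp [zsum]
      simp only [flipv, hys, if_false, h1,
        (by simp : ((0 : Int) :: ys) = ([] : List Int) ↔ False), omin]
      rw [if_neg (by omega : ¬ (1 + zsum ys = 0))]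
      split_ifs <;> simp
    · have h1 : zsum (x :: ys) = zsum ys := by simp [zsum, hx]
      simp only [flipv, hys, if_false, h1, if_neg hx,
        (by simp : (x :: ys) = ([] : List Int) ↔ False), omin]
      split_ifs <;> simp

lemma bstep_flip (s : Int × Bool × Option Int) (x : Int) :
    (bstep s x).2.2 = omin s.2.2 (some (if x = 0 then 0 else 2)) := by
  have hd : (max |x - 1| |x + 1|) - (min |x - 1| |x + 1|) = (if x = 0 then 0 else 2) := by
    rcases lt_trichotomy x 0 with h | h | h
    · rw [if_neg (ne_of_lt h), abs_of_neg (by omega : x - 1 < 0),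
        abs_of_nonpos (by omega : x + 1 ≤ 0),
        max_eq_left (by omega), min_eq_right (by omega)]
      omega
    · subst h; norm_num
    · rw [if_neg (ne_of_gt h), abs_of_nonneg (by omega : 0 ≤ x - 1),
        abs_of_pos (by omega : 0 < x + 1),
        max_eq_right (by omega), min_eq_left (by omega)]
      omega
  simp only [bstep, hd]
  generalize (if x = 0 then (0 : Int) else 2) = d
  cases s.2.2 with
  | none => simp [omin]
  | some v =>
    simp only [omin]
    split_ifs with h
    · rw [min_eq_right h.le]
    · rw [min_eq_left (not_lt.mp h)]

lemma min_abs_eq (x : Int) : min |x - 1| |x + 1| = if x = 0 then 1 else |x| - 1 := by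
  rcases lt_trichotomy x 0 with h | h | h
  · rw [if_neg (ne_of_lt h), abs_of_neg (by omega : x - 1 < 0),
      abs_of_nonpos (by omega : x + 1 ≤ 0), abs_of_neg h,
      min_eq_right (by omega)]
    omega
  · subst h; norm_num
  · rw [if_neg (ne_of_gt h), abs_of_nonneg (by omega : 0 ≤ x - 1),
      abs_of_pos (by omega : 0 < x + 1), abs_of_pos h,
      min_eq_left (by omega)]

lemma sgn_cons (x : Int) (ys : List Int) :
    decide (gsum (x :: ys) % 2 = 1) =
      xor (decide (x < 0)) (decide (gsum ys % 2 = 1)) := by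
  by_cases hx : x < 0
  · have h1 : gsum (x :: ys) = 1 + gsum ys := by simp [gsum, hx]
    rw [h1]
    rw [decide_eq_true hx, Bool.true_xor]
    by_cases h : gsum ys % 2 = 1
    · rw [decide_eq_true h, decide_eq_false (by omega : ¬ ((1 + gsum ys) % 2 = 1))]
      rfl
    · rw [decide_eq_false h, decide_eq_true (by omega : (1 + gsum ys) % 2 = 1)]
      rfl
  · have h1 : gsum (x :: ys) = gsum ys := by simp [gsum, hx]
    simp [h1, hx]

lemma btrip (ys : List Int) : ∀ (m : Int) (s : Bool) (f : Option Int),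
    ys.foldl bstep (m, s, f) =
      (m + msum ys + zsum ys, xor s (decide (gsum ys % 2 = 1)), omin f (flipv ys)) := by
  induction ys with
  | nil => intro m s f; cases f <;> simp [msum, zsum, gsum, flipv, omin]
  | cons x ys ih =>
    intro m s f
    simp only [List.foldl_cons, ih]
    refine Prod.ext ?_ (Prod.ext ?_ ?_)
    · show (bstep (m, s, f) x).1 + msum ys + zsum ys = m + msum (x :: ys) + zsum (x :: ys)
      have h1 : (bstep (m, s, f) x).1 = m + min |x - 1| |x + 1| := rfl
      rw [h1, min_abs_eq]
      by_cases hx : x = 0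
      · subst hx; simp [msum, zsum]; ring
      · simp [msum, zsum, hx]; ring
    · show xor (bstep (m, s, f) x).2.1 (decide (gsum ys % 2 = 1)) =
        xor s (decide (gsum (x :: ys) % 2 = 1))
      have h1 : (bstep (m, s, f) x).2.1 = if x < 0 then !s else s := rfl
      rw [h1, sgn_cons]
      by_cases hx : x < 0 <;> cases s <;> simp [hx]
    · show omin (bstep (m, s, f) x).2.2 (flipv ys) = omin f (flipv (x :: ys))
      rw [bstep_flip, flipv_cons, omin_assoc]

-- B's value for the truncated list, computed from the three sums
lemma alt_eq (n : Int) (arr : List Int) (hn : 0 < n) :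
    solve_alt n arr =
      msum (PySem.List.slice arr none (some n)) + zsum (PySem.List.slice arr none (some n)) +
      (if decide (gsum (PySem.List.slice arr none (some n)) % 2 = 1)
        then (flipv (PySem.List.slice arr none (some n))).getD 0 else 0) := by
  have h := btrip (PySem.List.slice arr none (some n)) 0 false none
  simp only [solve_alt, if_pos hn, h, omin, Bool.false_xor, zero_add]

lemma a_fold (n : Int) (arr : List Int) (h0 : 0 ≤ n) (hle : n ≤ (arr.length : Int)) :
    (PySem.List.pyRange 0 n 1).foldl
      (fun s i => solveStep s (PySem.List.pyGetD arr i 0)) (0, 0, 0) =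
    (arr.take n.toNat).foldl solveStep ((0 : Int), (0 : Int), (0 : Int)) := by
  have hlen : ((arr.take n.toNat).length : Int) = n := by
    simp [List.length_take]; omega
  have := PySem.List.foldl_pyRange_zero_pyGetD' (arr.take n.toNat) 0 solveStep
    ((0 : Int), (0 : Int), (0 : Int))
  rw [hlen] at this
  rw [← this]
  apply PySem.List.foldl_congr_mem
  intro s i hi
  have hmem := (PySem.List.mem_pyRange_one).1 hi
  have h1 : PySem.List.pyGetD arr i 0 = PySem.List.pyGetD (arr.take n.toNat) i 0 := by
    have hiN : i.toNat < (arr.take n.toNat).length := by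
      simp [List.length_take]; omega
    rw [PySem.List.pyGetD_of_nonneg arr 0 hmem.1,
        PySem.List.pyGetD_of_nonneg (arr.take n.toNat) 0 hmem.1]
    have hiA : i.toNat < arr.length := by omega
    simp [List.getD_eq_getElem?_getD, hiA, List.getElem?_eq_getElem hiN, List.getElem_take]
  rw [h1]

-- ===== VERDICT (by name: the statement is the Claim_ definition above) =====
theorem solve_spec : Claim_equal_solve := by
  intro n arr _ hpre
  unfold Spec_solve solve
  by_cases hn : 0 < n
  · rw [a_fold n arr hn.le hpre, trip, alt_eq n arr hn]
    set ys := arr.take n.toNat with hys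
    have hslice : PySem.List.slice arr none (some n) = ys := by
      rw [PySem.List.slice_to arr hn.le]
    rw [hslice]
    have hz := zsum_nonneg ys
    have hg := gsum_nonneg ys
    by_cases hodd : gsum ys % 2 = 1
    · have hne : ys ≠ [] := by
        intro h; rw [gsum_nil_of_nil ys h] at hodd; omega
      simp only [zero_add, hodd, decide_true, if_true, flipv, if_neg hne, Option.getD_some]
      split_ifs <;> dsimp only <;> omega
    · simp only [zero_add, decide_eq_false hodd, Bool.false_eq_true, if_false]
      rw [if_neg hodd]; dsimp only; omega
  · have : PySem.List.pyRange 0 n 1 = [] := PySem.List.pyRange_one_eq_nil (by omega)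
    simp [this, solve_alt, hn]
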